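-- pv_equiv track=rewrite | github.com/yihong0618/running_page | lib/python3.8/site-packages/polyline/codec.py | _trans
-- ===== SOURCE A (Python) =====
-- def _trans(value, index):
--     byte, result, shift = None, 0, 0
--
--     while byte is None or byte >= 0x20:
--         byte = ord(value[index]) - 63
--         index += 1
--         result |= (byte & 0x1f) << shift
--         shift += 5
--         comp = result & 1
--
--     return ~(result >> 1) if comp else (result >> 1), index
-- ===== SOURCE B (Python) =====
-- def _trans(value, index):
--     # Collect the 5-bit chunks first, then combine them back-to-front
--     # (Horner style) and zigzag-decode once at the end.
--     chunks = []
--     while True: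
--         byte = ord(value[index]) - 63
--         index += 1
--         chunks.append(byte & 0x1f)
--         if byte < 0x20:
--             break
--     result = 0
--     for c in reversed(chunks):
--         result = (result << 5) | c
--     if result & 1:
--         return ~(result >> 1), index
--     return result >> 1, index
-- ===== Notes on version B (the rewrite author's own statement) =====
-- stated objective: alternative
-- what changed: A accumulates the varint inline (result |= (byte & 0x1f) << shift with a growing shift) inside its do-while; B first collects the 5-bit chunks in one pass, then combines them back-to-front Horner-style ((result << 5) | chunk) and zigzag-decodes once at the end.
import Mathlib
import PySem

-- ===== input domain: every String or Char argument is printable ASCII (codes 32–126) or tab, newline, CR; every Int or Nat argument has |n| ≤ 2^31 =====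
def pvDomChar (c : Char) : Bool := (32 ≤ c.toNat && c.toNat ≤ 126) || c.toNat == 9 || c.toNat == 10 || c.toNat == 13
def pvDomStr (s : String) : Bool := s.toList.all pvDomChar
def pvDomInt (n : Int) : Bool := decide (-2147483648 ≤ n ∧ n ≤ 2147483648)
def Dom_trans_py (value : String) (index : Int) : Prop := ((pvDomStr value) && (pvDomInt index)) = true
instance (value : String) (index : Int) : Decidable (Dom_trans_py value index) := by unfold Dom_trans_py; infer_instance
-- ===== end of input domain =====

-- B changes A's decomposition: it collects the 5-bit chunks in a first pass, then combines
-- them back-to-front Horner-style ((r << 5) | c) and zigzag-decodes once at the end,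
-- instead of A's single inline OR-accumulate-at-growing-shift loop; same cost (alternative).

-- ===== PORT A =====
-- A's do-while: read value[index], accumulate result |= (byte & 0x1f) << shift, stop when byte < 0x20.
-- Fuel bounds the iterations (the loop reads strictly increasing positions); none = IndexError.
def transALoop (cs : List Char) (index result : Int) (shift : Nat) : Nat → Option (Int × Int)
  | 0 => none
  | fuel + 1 =>
    match PySem.List.pyGet? cs index with
    | none => none
    | some ch =>
      let byte : Int := (ch.toNat : Int) - 63
      let index' := index + 1
      let result' := PySem.Int.bor result ((PySem.Int.band byte 31) <<< shift)
      if byte ≥ 32 then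
        transALoop cs index' result' (shift + 5) fuel
      else
        let comp := PySem.Int.band result' 1
        some (if comp ≠ 0 then Int.not (result' >>> 1) else result' >>> 1, index')

def trans_py (value : String) (index : Int) : Int × Int :=
  (transALoop value.toList index 0 0 (value.toList.length + index.natAbs + 1)).getD (0, 0)

-- ===== PORT B =====
-- B's first pass: collect the chunks byte & 0x1f (same reads, same index stepping as the Python loop).
def transBCollect (cs : List Char) (index : Int) (chunks : List Int) : Nat → Option (List Int × Int)
  | 0 => none
  | fuel + 1 =>
    match PySem.List.pyGet? cs index with
    | none => none
    | some ch =>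
      let byte : Int := (ch.toNat : Int) - 63
      let index' := index + 1
      let chunks' := chunks ++ [PySem.Int.band byte 31]
      if byte < 32 then some (chunks', index')
      else transBCollect cs index' chunks' fuel

def trans_py_alt (value : String) (index : Int) : Int × Int :=
  match transBCollect value.toList index [] (value.toList.length + index.natAbs + 1) with
  | none => (0, 0)
  | some (chunks, idx) =>
    let result := chunks.reverse.foldl (fun r c => PySem.Int.bor (r <<< (5:Nat)) c) 0
    if PySem.Int.band result 1 ≠ 0 then (Int.not (result >>> 1), idx)
    else (result >>> 1, idx)

-- ===== PRECONDITION & SPEC =====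
-- Pre_ = exactly the inputs where A's loop terminates instead of running off the string
-- (otherwise Python raises IndexError): the start index is in Python's index range and a
-- terminating byte (code < 95) occurs at or after it (anywhere, if the start is negative,
-- since Python's negative indexing makes the scan wrap to position 0 after value[-1]).
def Pre_trans_py (value : String) (index : Int) : Prop :=
  if 0 ≤ index then
    index < (value.toList.length : Int) ∧
      (value.toList.drop index.toNat).any (fun c => decide (c.toNat < 95)) = true
  else
    -(value.toList.length : Int) ≤ index ∧
      value.toList.any (fun c => decide (c.toNat < 95)) = true
instance (value : String) (index : Int) : Decidable (Pre_trans_py value index) := by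
  unfold Pre_trans_py; infer_instance

def pvWitness_trans_py : String × Int := ("_p~iF", 0)

def Spec_trans_py (value : String) (index : Int) (out : Int × Int) : Prop := out = trans_py_alt value index
instance (value : String) (index : Int) (out : Int × Int) : Decidable (Spec_trans_py value index out) := by unfold Spec_trans_py; infer_instance

-- ===== CLAIM (what is proved, stated in full; the proofs are below) =====
def Claim_equal_trans_py : Prop := ∀ (value : String) (index : Int), Dom_trans_py value index → Pre_trans_py value index → Spec_trans_py value index (trans_py value index)

-- ===== LEMMAS AND PROOFS =====

-- low bits below 2^s and high part shifted by s combine by OR exactly as by addition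
theorem pv_lor_shift_eq_add (s : Nat) : ∀ m n : Nat, m < 2^s → m ||| (n <<< s) = m + n * 2^s := by
  induction s with
  | zero => intro m n h; interval_cases m; simp [Nat.shiftLeft_eq]
  | succ s ih =>
    intro m n h
    have hd : m.bodd.toNat + 2 * m.div2 = m := Nat.bodd_add_div2 m
    have hb : n <<< (s+1) = Nat.bit false (n <<< s) := by
      simp [Nat.bit, Nat.shiftLeft_eq, Nat.pow_succ]; ring
    have hm : m = Nat.bit (m.bodd) (m.div2) := by
      simp [Nat.bit]; cases hb2 : m.bodd <;> simp [hb2] at hd ⊢ <;> ring_nf <;> omega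
    have h2 : 2^(s+1) = 2 * 2^s := by ring
    have hlt : m.div2 < 2 ^ s := by omega
    calc m ||| (n <<< (s+1)) = Nat.bit m.bodd m.div2 ||| Nat.bit false (n <<< s) := by
            rw [← hm, ← hb]
      _ = Nat.bit (m.bodd || false) (m.div2 ||| (n <<< s)) := Nat.lor_bit _ _ _ _
      _ = Nat.bit m.bodd (m.div2 + n * 2^s) := by rw [ih m.div2 n hlt, Bool.or_false]
      _ = m + n * 2^(s+1) := by
            clear hb hm
            rw [h2]
            simp [Nat.bit]; cases hb2 : m.bodd <;> simp [hb2] at hd ⊢ <;> ring_nf <;> omega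

-- the Int version for nonnegative operands
theorem pv_bor_hi (a c : Int) (s : Nat) (ha : 0 ≤ a) (h : a < 2^s) (hc : 0 ≤ c) :
    PySem.Int.bor a (c <<< s) = a + c * 2^s := by
  obtain ⟨m, rfl⟩ := Int.eq_ofNat_of_zero_le ha
  obtain ⟨n, rfl⟩ := Int.eq_ofNat_of_zero_le hc
  have hcast : ((n : Int) <<< s) = ((n <<< s : Nat) : Int) := rfl
  rw [hcast, PySem.Int.bor_natCast]
  have hm : m < 2^s := by exact_mod_cast h
  rw [pv_lor_shift_eq_add s m n hm]
  push_cast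
  ring

-- Horner step: (r << 5) | c = 32*r + c for a 5-bit c
theorem pv_horner_step (r c : Int) (hr : 0 ≤ r) (hc0 : 0 ≤ c) (hc : c < 32) :
    PySem.Int.bor (r <<< (5:Nat)) c = c + r * 32 := by
  rw [PySem.Int.bor_comm]
  have := pv_bor_hi c r 5 hc0 (by norm_num; omega) hr
  norm_num at this
  exact this

def pvHorner (chunks : List Int) : Int :=
  chunks.reverse.foldl (fun r c => PySem.Int.bor (r <<< (5:Nat)) c) 0

theorem pv_foldl_acc (l : List Int) : ∀ a : Int, (∀ c ∈ l, 0 ≤ c ∧ c < 32) → 0 ≤ a →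
    l.foldl (fun r c => PySem.Int.bor (r <<< (5:Nat)) c) a
      = l.foldl (fun r c => PySem.Int.bor (r <<< (5:Nat)) c) 0 + a * 2 ^ (5 * l.length) := by
  induction l with
  | nil => intro a _ _; simp
  | cons x l ih =>
    intro a hb ha
    have hx := hb x (List.mem_cons_self)
    have hbl : ∀ c ∈ l, 0 ≤ c ∧ c < 32 := fun c hc => hb c (List.mem_cons_of_mem _ hc)
    simp only [List.foldl_cons]
    rw [pv_horner_step a x ha hx.1 hx.2, pv_horner_step 0 x (le_refl 0) hx.1 hx.2]
    rw [ih (x + a * 32) hbl (by omega), ih (x + 0 * 32) hbl (by omega)]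
    have : (2:Int) ^ (5 * (x :: l).length) = 2 ^ (5 * l.length) * 32 := by
      simp [List.length_cons]; ring
    rw [this]; ring

theorem pv_horner_nonneg (chunks : List Int) (hb : ∀ c ∈ chunks, 0 ≤ c ∧ c < 32) :
    0 ≤ pvHorner chunks ∧ pvHorner chunks < 2 ^ (5 * chunks.length) := by
  induction chunks using List.reverseRecOn with
  | nil => simp [pvHorner]
  | append_singleton l x ih =>
    have hx := hb x (by simp)
    have hbl : ∀ c ∈ l, 0 ≤ c ∧ c < 32 := fun c hc => hb c (by simp [hc])
    have ihl := ih hbl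
    have hrevb : ∀ c ∈ l.reverse, 0 ≤ c ∧ c < 32 := fun c hc => hbl c (List.mem_reverse.mp hc)
    have : pvHorner (l ++ [x]) = pvHorner l + x * 2 ^ (5 * l.length) := by
      unfold pvHorner
      rw [List.reverse_append]
      simp only [List.reverse_cons, List.reverse_nil, List.nil_append, List.cons_append,
        List.foldl_cons]
      rw [pv_horner_step 0 x (le_refl 0) hx.1 hx.2]
      rw [pv_foldl_acc l.reverse (x + 0 * 32) hrevb (by omega)]
      simp
    rw [this]
    constructor
    · have := hx.1; have := ihl.1; positivity
    · have h32 : (2:Int) ^ (5 * (l ++ [x]).length) = 2 ^ (5 * l.length) * 32 := by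
        simp [List.length_append]; ring
      rw [h32]
      nlinarith [ihl.1, ihl.2, hx.1, hx.2, pow_pos (show (0:Int) < 2 by norm_num) (5 * l.length)]

theorem pv_horner_snoc (chunks : List Int) (c : Int) (hb : ∀ d ∈ chunks, 0 ≤ d ∧ d < 32)
    (hc0 : 0 ≤ c) (hc : c < 32) :
    pvHorner (chunks ++ [c]) = pvHorner chunks + c * 2 ^ (5 * chunks.length) := by
  unfold pvHorner
  rw [List.reverse_append]
  simp only [List.reverse_cons, List.reverse_nil, List.nil_append, List.cons_append,
    List.foldl_cons]
  rw [pv_horner_step 0 c (le_refl 0) hc0 hc]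
  rw [pv_foldl_acc chunks.reverse (c + 0 * 32)
    (fun d hd => hb d (List.mem_reverse.mp hd)) (by omega)]
  simp

-- the byte & 0x1f chunk is a 5-bit value
theorem pv_chunk_bounds (ch : Char) : 0 ≤ PySem.Int.band ((ch.toNat : Int) - 63) 31 ∧
    PySem.Int.band ((ch.toNat : Int) - 63) 31 < 32 := by
  constructor
  · rw [PySem.Int.band_comm]
    exact PySem.Int.band_nonneg_of_nonneg_left _ (by norm_num)
  · have h31 : (31 : Int) = ((31 : Nat) : Int) := rfl
    by_cases hpos : 0 ≤ (ch.toNat : Int) - 63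
    · obtain ⟨m, hm⟩ := Int.eq_ofNat_of_zero_le hpos
      rw [hm, h31, PySem.Int.band_natCast]
      have : m &&& 31 ≤ 31 := Nat.and_le_right
      exact_mod_cast Nat.lt_succ_of_le this
    · -- negative byte: band with 31 keeps only the low 5 bits, still < 32
      have hlt : ch.toNat < 63 := by
        by_contra hge
        exact hpos (by omega)
      have hall : ∀ m : Nat, m < 63 → PySem.Int.band ((m : Int) - 63) 31 < 32 := by decide
      exact hall ch.toNat hlt

-- the loops step in lock-step; A's accumulator is always the Horner value of B's chunks
theorem pv_loop_eq (cs : List Char) : ∀ (fuel : Nat) (index : Int) (chunks : List Int),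
    (∀ c ∈ chunks, 0 ≤ c ∧ c < 32) →
    transALoop cs index (pvHorner chunks) (5 * chunks.length) fuel
      = (transBCollect cs index chunks fuel).map (fun p =>
          (if PySem.Int.band (pvHorner p.1) 1 ≠ 0 then Int.not (pvHorner p.1 >>> 1)
           else pvHorner p.1 >>> 1, p.2)) := by
  intro fuel
  induction fuel with
  | zero => intro index chunks _; simp [transALoop, transBCollect]
  | succ fuel ih =>
    intro index chunks hb
    simp only [transALoop, transBCollect]
    cases hget : PySem.List.pyGet? cs index with
    | none => simp
    | some ch =>
      simp only
      have hcb := pv_chunk_bounds ch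
      have hb' : ∀ c ∈ chunks ++ [PySem.Int.band ((ch.toNat : Int) - 63) 31], 0 ≤ c ∧ c < 32 := by
        intro c hc
        rcases List.mem_append.mp hc with h | h
        · exact hb c h
        · simp at h; subst h; exact hcb
      have hres : PySem.Int.bor (pvHorner chunks)
            ((PySem.Int.band ((ch.toNat : Int) - 63) 31) <<< (5 * chunks.length))
          = pvHorner (chunks ++ [PySem.Int.band ((ch.toNat : Int) - 63) 31]) := by
        have hh := pv_horner_nonneg chunks hb
        rw [pv_bor_hi _ _ _ hh.1 hh.2 hcb.1, pv_horner_snoc chunks _ hb hcb.1 hcb.2]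
      by_cases hbyte : (ch.toNat : Int) - 63 ≥ 32
      · rw [if_pos hbyte, if_neg (by omega)]
        rw [hres]
        have hlen : 5 * chunks.length + 5
            = 5 * (chunks ++ [PySem.Int.band ((ch.toNat : Int) - 63) 31]).length := by
          simp [List.length_append]; ring
        rw [hlen]
        exact ih (index + 1) _ hb'
      · rw [if_neg hbyte]
        rw [if_pos (show (ch.toNat : Int) - 63 < 32 by omega)]
        simp only [Option.map_some]
        rw [hres]

-- ===== VERDICT (by name: the statement is the Claim_ definition above) =====
theorem trans_py_spec : Claim_equal_trans_py := by
  intro value index _ _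
  unfold Spec_trans_py trans_py trans_py_alt
  have h := pv_loop_eq value.toList (value.toList.length + index.natAbs + 1) index []
    (by intro c hc; simp at hc)
  simp only [pvHorner, List.reverse_nil, List.foldl_nil, List.length_nil, Nat.mul_zero] at h
  rw [h]
  cases hc : transBCollect value.toList index [] (value.toList.length + index.natAbs + 1) with
  | none => simp
  | some p =>
    simp only [Option.map_some, Option.getD_some]
    obtain ⟨chunks, idx⟩ := p
    split_ifs <;> simp_all
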